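-- pv_equiv track=rewrite | github.com/skyyao/vad | vad.py | cal_energy
-- ===== SOURCE A (Python) =====
-- fsize = 256
--
-- def cal_energy(samp) :
-- 	energy = []
-- 	s = 0
-- 	l = len(samp)
--
-- 	for i in range(l) :
-- 		s = s + (int(samp[i]) * int(samp[i]))
-- 		if (i + 1) % fsize == 0 :
-- 			energy.append(s)
-- 			s = 0
-- 		elif i == l - 1 :
-- 			energy.append(s)
-- 	return energy
-- ===== SOURCE B (Python) =====
-- def cal_energy(samp):
--     energy = []
--     i = 0
--     n = len(samp)
--     while i < n:
--         energy.append(sum(int(x) * int(x) for x in samp[i:i+256]))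
--         i += 256
--     return energy
-- ===== Notes on version B (the rewrite author's own statement) =====
-- stated objective: simpler
-- what changed: Replaces the flat indexed loop with a running accumulator, per-index modulo check and separate last-element flush by chunking the list into 256-sample frames and summing each frame's squares directly.
import Mathlib
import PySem

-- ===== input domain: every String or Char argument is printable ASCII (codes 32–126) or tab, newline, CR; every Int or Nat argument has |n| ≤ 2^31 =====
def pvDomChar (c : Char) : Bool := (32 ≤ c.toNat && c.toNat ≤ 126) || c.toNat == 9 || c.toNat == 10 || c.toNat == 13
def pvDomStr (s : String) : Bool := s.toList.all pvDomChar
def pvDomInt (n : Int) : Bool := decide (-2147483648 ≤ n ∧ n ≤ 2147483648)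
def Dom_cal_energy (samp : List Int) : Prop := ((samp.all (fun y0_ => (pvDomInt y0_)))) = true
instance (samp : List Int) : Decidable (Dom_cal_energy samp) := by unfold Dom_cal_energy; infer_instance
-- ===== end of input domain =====

-- B replaces A's flat indexed loop (running accumulator, per-index modulo test, separate
-- last-element flush) by chunking the list into 256-sample frames and summing each frame's
-- squares directly; objective: simpler.

-- ===== PORT A =====
-- loop body of A's 'for i in range(l)': state = (energy, s)
def cal_energy_step (samp : List Int) (l : Nat) (es : List Int × Int) (i : Nat) : List Int × Int :=
  let s := es.2 + samp.getD i 0 * samp.getD i 0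
  if (i + 1) % 256 = 0 then (es.1 ++ [s], 0)
  else if i = l - 1 then (es.1 ++ [s], s)
  else (es.1, s)

def cal_energy (samp : List Int) : List Int :=
  ((List.range samp.length).foldl (cal_energy_step samp samp.length) ([], 0)).1

-- ===== PORT B =====
-- B's 'while i < n' loop; the slice samp[i:i+256] (0 ≤ i) is exactly (samp.drop i).take 256
def cal_energy_alt_go (samp : List Int) (i : Nat) : List Int :=
  if h : i < samp.length then
    (((samp.drop i).take 256).foldl (fun a x => a + x * x) 0) :: cal_energy_alt_go samp (i + 256)
  else []
termination_by samp.length - i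
decreasing_by omega

def cal_energy_alt (samp : List Int) : List Int := cal_energy_alt_go samp 0

-- ===== PRECONDITION & SPEC =====
def Spec_cal_energy (samp : List Int) (out : List Int) : Prop := out = cal_energy_alt samp
instance (samp : List Int) (out : List Int) : Decidable (Spec_cal_energy samp out) := by unfold Spec_cal_energy; infer_instance

-- ===== CLAIM (what is proved, stated in full; the proofs are below) =====
def Claim_equal_cal_energy : Prop := ∀ (samp : List Int), Dom_cal_energy samp → Spec_cal_energy samp (cal_energy samp)

-- ===== LEMMAS AND PROOFS =====

-- proof-side restatement of B as a structural recursion on the list, 256 samples at a time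
def pvChunkRec (samp : List Int) : List Int :=
  if h : samp = [] then []
  else ((samp.take 256).foldl (fun a x => a + x * x) 0) :: pvChunkRec (samp.drop 256)
termination_by samp.length
decreasing_by
  have : samp.length ≠ 0 := fun hl => h (List.eq_nil_of_length_eq_zero hl)
  simp; omega

theorem pvChunkRec_nil : pvChunkRec [] = [] := by
  unfold pvChunkRec; simp

theorem pvChunkRec_cons (samp : List Int) (h : samp ≠ []) :
    pvChunkRec samp =
      ((samp.take 256).foldl (fun a x => a + x * x) 0) :: pvChunkRec (samp.drop 256) := by
  rw [pvChunkRec]; simp [h]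

-- B's index loop visits exactly the chunks of the dropped suffix
theorem cal_energy_alt_go_eq (samp : List Int) (i : Nat) :
    cal_energy_alt_go samp i = pvChunkRec (samp.drop i) := by
  by_cases hi : i < samp.length
  · have hne : samp.drop i ≠ [] := by
      intro hnil
      have := congrArg List.length hnil
      simp at this; omega
    have h2 : (samp.drop i).drop 256 = samp.drop (i + 256) := by
      rw [List.drop_drop]
      try (congr 1; omega)
    rw [cal_energy_alt_go, dif_pos hi, pvChunkRec_cons _ hne, h2,
      cal_energy_alt_go_eq samp (i + 256)]
  · rw [cal_energy_alt_go]
    have : samp.drop i = [] := List.drop_eq_nil_of_le (by omega)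
    simp [hi, this, pvChunkRec_nil]
termination_by samp.length - i
decreasing_by omega

theorem cal_energy_alt_eq_chunkRec (samp : List Int) :
    cal_energy_alt samp = pvChunkRec samp := by
  unfold cal_energy_alt
  rw [cal_energy_alt_go_eq]
  simp

-- the energy list only grows: a fold from (e, s) is the fold from ([], s) with prefix e
theorem cal_energy_step_prefix (samp : List Int) (l : Nat) (is : List Nat) (e : List Int) (s : Int) :
    is.foldl (cal_energy_step samp l) (e, s) =
      ((e ++ (is.foldl (cal_energy_step samp l) ([], s)).1, (is.foldl (cal_energy_step samp l) ([], s)).2)) := by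
  induction is generalizing e s with
  | nil => simp
  | cons i is ih =>
      simp only [List.foldl_cons]
      have hstep : cal_energy_step samp l (e, s) i =
          (e ++ (cal_energy_step samp l ([], s) i).1, (cal_energy_step samp l ([], s) i).2) := by
        unfold cal_energy_step
        split_ifs <;> simp
      rw [hstep]
      obtain ⟨p, s'⟩ := cal_energy_step samp l ([], s) i
      rw [ih (e ++ p) s', ih p s']
      simp

-- a run of indices on which neither branch fires just accumulates the sum of squares
theorem cal_energy_acc (samp : List Int) (l k : Nat) (s : Int)
    (h1 : k < l) (h2 : k ≤ 255) (h3 : k ≤ samp.length) :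
    (List.range k).foldl (cal_energy_step samp l) ([], s) =
      ([], (samp.take k).foldl (fun a x => a + x * x) s) := by
  induction k with
  | zero => simp
  | succ k ih =>
      rw [List.range_succ, List.foldl_append,
        ih (by omega) (by omega) (by omega), List.foldl_cons, List.foldl_nil]
      have hk : k < samp.length := by omega
      have hstep : cal_energy_step samp l ([], (samp.take k).foldl (fun a x => a + x * x) s) k =
          ([], (samp.take k).foldl (fun a x => a + x * x) s + samp.getD k 0 * samp.getD k 0) := by
        unfold cal_energy_step
        have hm : (k + 1) % 256 = k + 1 := Nat.mod_eq_of_lt (by omega)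
        have hne : k ≠ l - 1 := by omega
        simp [hm, hne]
      rw [hstep]
      have ht : samp.take (k + 1) = samp.take k ++ [samp.getD k 0] := by
        rw [List.take_succ]
        simp [List.getElem?_eq_getElem hk, List.getD_eq_getElem?_getD,
          List.getElem?_eq_getElem hk]
      rw [ht, List.foldl_append]
      simp

-- one full step at the last index of a short (≤ 256) list appends the running sum
theorem cal_energy_last (samp : List Int) (l : Nat) (s : Int) (hl : 1 ≤ l) :
    (cal_energy_step samp l ([], s) (l - 1)).1 = [s + samp.getD (l - 1) 0 * samp.getD (l - 1) 0] := by
  unfold cal_energy_step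
  split_ifs <;> simp_all

-- the fold over the last 256-aligned suffix is the fold of the dropped list
theorem cal_energy_shift (samp : List Int) (l : Nat) (hl : l = samp.length) (hgt : 256 < l)
    (es : List Int × Int) :
    ((List.range (l - 256)).map (256 + ·)).foldl (cal_energy_step samp l) es =
      (List.range (l - 256)).foldl (cal_energy_step (samp.drop 256) (l - 256)) es := by
  rw [List.foldl_map]
  apply PySem.List.foldl_congr_mem
  intro acc i hi
  have hi' : i < l - 256 := List.mem_range.mp hi
  unfold cal_energy_step
  have hget : samp.getD (256 + i) 0 = (samp.drop 256).getD i 0 := by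
    rw [List.getD_eq_getElem?_getD, List.getD_eq_getElem?_getD, List.getElem?_drop]
  have hmod : (256 + i + 1) % 256 = (i + 1) % 256 := by
    have : 256 + i + 1 = 256 + (i + 1) := by omega
    rw [this, Nat.add_mod_left]
  have hlast : (256 + i = l - 1) ↔ (i = l - 256 - 1) := by omega
  rw [hget, hmod]
  simp only [hlast]

theorem cal_energy_main : ∀ (n : Nat) (samp : List Int), samp.length ≤ n →
    cal_energy samp = pvChunkRec samp := by
  intro n
  induction n with
  | zero =>
      intro samp hle
      have : samp = [] := List.eq_nil_of_length_eq_zero (by omega)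
      subst this
      simp [cal_energy, pvChunkRec_nil]
  | succ n ih =>
      intro samp hle
      by_cases hnil : samp = []
      · subst hnil; simp [cal_energy, pvChunkRec_nil]
      · have hl1 : 1 ≤ samp.length := by
          cases samp with
          | nil => exact absurd rfl hnil
          | cons a t => simp
        set l := samp.length with hl
        unfold cal_energy
        by_cases hle256 : l ≤ 256
        · -- a single (possibly partial) frame
          have hdecomp : List.range l = List.range (l - 1) ++ [l - 1] := by
            have : l = (l - 1) + 1 := by omega
            rw [this, List.range_succ]; simp
          rw [hdecomp, List.foldl_append,
            cal_energy_acc samp l (l - 1) 0 (by omega) (by omega) (by omega),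
            List.foldl_cons, List.foldl_nil, cal_energy_last samp l _ hl1]
          have htake : samp.take ((l - 1) + 1) = samp.take (l - 1) ++ [samp.getD (l - 1) 0] := by
            have hk : l - 1 < samp.length := by omega
            rw [List.take_succ]
            simp [List.getElem?_eq_getElem hk, List.getD_eq_getElem?_getD,
              List.getElem?_eq_getElem hk]
          have hfull : samp.take 256 = samp := List.take_of_length_le (by omega)
          have hdrop : samp.drop 256 = [] := List.drop_eq_nil_of_le (by omega)
          rw [pvChunkRec_cons samp hnil, hdrop, pvChunkRec_nil, hfull]
          have : samp.foldl (fun a x => a + x * x) 0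
              = (samp.take (l - 1)).foldl (fun a x => a + x * x) 0
                + samp.getD (l - 1) 0 * samp.getD (l - 1) 0 := by
            conv_lhs => rw [show samp = samp.take l from (List.take_of_length_le (by omega)).symm,
              show l = (l - 1) + 1 from by omega, htake]
            rw [List.foldl_append]; simp
          rw [this]
        · -- a full first frame followed by the rest
          have hgt : 256 < l := by omega
          have hdecomp : List.range l = List.range 256 ++ (List.range (l - 256)).map (256 + ·) := by
            have : l = 256 + (l - 256) := by omega
            rw [this, List.range_add]; simp
          have h256 : List.range 256 = List.range 255 ++ [255] := by
            rw [show (256 : Nat) = 255 + 1 from rfl, List.range_succ]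
          rw [hdecomp, List.foldl_append, h256, List.foldl_append,
            cal_energy_acc samp l 255 0 (by omega) (by omega) (by omega),
            List.foldl_cons, List.foldl_nil]
          have hstep255 : cal_energy_step samp l ([], (samp.take 255).foldl (fun a x => a + x * x) 0) 255 =
              ((([(samp.take 256).foldl (fun a x => a + x * x) 0] : List Int)), 0) := by
            unfold cal_energy_step
            have htake : samp.take 256 = samp.take 255 ++ [samp.getD 255 0] := by
              have hk : 255 < samp.length := by omega
              rw [show (256 : Nat) = 255 + 1 from rfl, List.take_succ]
              simp [List.getElem?_eq_getElem hk, List.getD_eq_getElem?_getD,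
                List.getElem?_eq_getElem hk]
            rw [htake, List.foldl_append]
            simp
          rw [hstep255, cal_energy_shift samp l hl hgt,
            cal_energy_step_prefix (samp.drop 256) (l - 256) (List.range (l - 256))
              [(samp.take 256).foldl (fun a x => a + x * x) 0] 0]
          rw [pvChunkRec_cons samp hnil]
          have hrec := ih (samp.drop 256) (by simp at *; omega)
          unfold cal_energy at hrec
          rw [show l - 256 = (samp.drop 256).length from by simp [hl], hrec]
          rfl

-- ===== VERDICT (by name: the statement is the Claim_ definition above) =====
theorem cal_energy_spec : Claim_equal_cal_energy := by
  intro samp _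
  unfold Spec_cal_energy
  rw [cal_energy_alt_eq_chunkRec]
  exact cal_energy_main samp.length samp le_rfl
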